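-- pv_equiv track=rewrite | github.com/christianvuye/py_micro_exercises | dsa/lists, dicts, sets/04_session_duration_analyzer.py | find_suspicious_users
-- ===== SOURCE A (Python) =====
-- def find_suspicious_users(sessions: list[tuple], threshold: int) -> list[str]:
--     # Docstring here
--     users = {}
--     for session in sessions:
--         if session[0] not in users:
--             users[session[0]] = {"session count": 1, "has_long_session": False}
--         else:
--             users[session[0]]["session count"] += 1
--         if session[1] > threshold:
--             # alternatively, you could check here if the boolean check here is already True
--             users[session[0]]["has_long_session"] = True
--     return [
--         k for k, v in users.items() if v["session count"] > 1 and v["has_long_session"]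
--     ]
-- ===== SOURCE B (Python) =====
-- def find_suspicious_users(sessions: list[tuple], threshold: int) -> list[str]:
--     order = list(dict.fromkeys(u for u, _ in sessions))
--     return [
--         u for u in order
--         if sum(1 for v, _ in sessions if v == u) > 1
--         and any(d > threshold for v, d in sessions if v == u)
--     ]
-- ===== Notes on version B (the rewrite author's own statement) =====
-- stated objective: alternative
-- what changed: B replaces A's single-pass dict that maintains a per-user running count and long-session flag by a dict-free two-stage scheme: it first lists the distinct users in first-occurrence order (dict.fromkeys) and then re-scans the whole session list per user, counting that user's sessions and testing for a long one directly in the filtering comprehension.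
import Mathlib
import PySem

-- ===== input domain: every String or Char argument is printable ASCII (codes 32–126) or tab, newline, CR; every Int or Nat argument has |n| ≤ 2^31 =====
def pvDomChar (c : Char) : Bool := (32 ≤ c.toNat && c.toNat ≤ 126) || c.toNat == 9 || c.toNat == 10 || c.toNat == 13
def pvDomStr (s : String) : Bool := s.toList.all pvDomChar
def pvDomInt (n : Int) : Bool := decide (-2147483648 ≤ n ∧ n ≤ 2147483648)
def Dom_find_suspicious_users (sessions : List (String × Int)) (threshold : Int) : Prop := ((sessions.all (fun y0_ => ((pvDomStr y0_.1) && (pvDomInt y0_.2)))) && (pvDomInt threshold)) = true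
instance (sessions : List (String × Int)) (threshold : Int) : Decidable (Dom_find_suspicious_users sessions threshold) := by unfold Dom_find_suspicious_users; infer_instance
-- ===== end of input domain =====

-- B drops A's single-pass dict of per-user {count, flag}: it lists the distinct users in
-- first-occurrence order and re-scans the sessions per user (objective: alternative, not faster).

-- ===== PORT A =====
-- The inner Python dict {"session count": …, "has_long_session": …} is ported as the pair
-- (count, flag) : Int × Bool (fixed string keys, heterogeneous values).
-- 'users[k]["session count"] += 1' is ported with Dict.modify; the branch guarantees k is present,
-- so the default value (0, false) is never read.
def find_suspicious_users (sessions : List (String × Int)) (threshold : Int) : List String :=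
  let users : PySem.Dict String (Int × Bool) :=
    sessions.foldl (fun users session =>
      let users :=
        if !(users.contains session.1) then
          users.insert session.1 (1, false)
        else
          users.modify session.1 (0, false) (fun v => (v.1 + 1, v.2))
      if session.2 > threshold then
        users.modify session.1 (0, false) (fun v => (v.1, true))
      else users) PySem.Dict.empty
  (users.items.filter (fun kv => decide (kv.2.1 > 1) && kv.2.2)).map (·.1)

-- ===== PORT B =====
-- 'list(dict.fromkeys(u for u, _ in sessions))' is PySem.List.dedup of the user column;
-- 'sum(1 for v, _ in sessions if v == u)' is countP (cast to Int for the comparison).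
def find_suspicious_users_alt (sessions : List (String × Int)) (threshold : Int) : List String :=
  let order := PySem.List.dedup (sessions.map (·.1))
  order.filter (fun u =>
    decide ((sessions.countP (fun p => p.1 == u) : Int) > 1) &&
    sessions.any (fun p => p.1 == u && decide (p.2 > threshold)))

-- ===== PRECONDITION & SPEC =====
def Spec_find_suspicious_users (sessions : List (String × Int)) (threshold : Int) (out : List String) : Prop := out = find_suspicious_users_alt sessions threshold
instance (sessions : List (String × Int)) (threshold : Int) (out : List String) : Decidable (Spec_find_suspicious_users sessions threshold out) := by unfold Spec_find_suspicious_users; infer_instance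

-- ===== CLAIM (what is proved, stated in full; the proofs are below) =====
def Claim_equal_find_suspicious_users : Prop := ∀ (sessions : List (String × Int)) (threshold : Int), Dom_find_suspicious_users sessions threshold → Spec_find_suspicious_users sessions threshold (find_suspicious_users sessions threshold)

-- ===== LEMMAS AND PROOFS =====

-- Proof plan: a GHOST grouping fold G (dict of per-user duration lists, used by neither port)
-- sits between the two programs. pv_fold relates A's fold to G entrywise via pvF; PySem's
-- grouping lemmas characterise G's items, and both sides reduce to a filter over the dedup list.

-- pvF maps a grouping entry (user, durations) to the A-side entry (user, (count, flag)).
def pvF (th : Int) (p : String × List Int) : String × (Int × Bool) :=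
  (p.1, ((p.2.length : Int), p.2.any (fun d => decide (d > th))))
theorem pv_contains_map (th : Int) (d : PySem.Dict String (List Int)) (u : String) :
    (PySem.Dict.mk ((d.items).map (pvF th))).contains u = d.contains u := by
  have h : ((fun p : String × (Int × Bool) => p.1 == u) ∘ pvF th)
      = (fun p : String × List Int => p.1 == u) := rfl
  simp [PySem.Dict.contains, List.any_map, h]
theorem pv_get?_map (th : Int) (d : PySem.Dict String (List Int)) (u : String) :
    (PySem.Dict.mk ((d.items).map (pvF th))).get? u
      = (d.get? u).map (fun l => ((l.length : Int), l.any (fun x => decide (x > th)))) := by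
  simp only [PySem.Dict.get?, List.find?_map]
  have h : ((fun p : String × (Int × Bool) => p.1 == u) ∘ pvF th)
      = (fun p : String × List Int => p.1 == u) := by
    funext p; rfl
  rw [h]
  cases List.find? (fun p : String × List Int => p.1 == u) d.1 <;> rfl
theorem pv_insert_map (th : Int) (d : PySem.Dict String (List Int)) (u : String) (b : List Int) :
    (PySem.Dict.mk ((d.items).map (pvF th))).insert u (pvF th (u, b)).2
      = PySem.Dict.mk (((d.insert u b).items).map (pvF th)) := by
  simp only [PySem.Dict.insert, pv_contains_map]
  by_cases h : d.contains u = true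
  · simp only [h, if_pos, List.map_map]
    congr 1
    apply List.map_congr_left
    intro p _
    by_cases hpe : p.1 = u <;> simp [hpe, pvF]
  · simp only [eq_false_of_ne_true h, Bool.false_eq_true, if_neg, not_false_iff,
      List.map_append]
    rfl
theorem pv_step (th : Int) (d : PySem.Dict String (List Int)) (u : String) (t : Int) :
    (let users := PySem.Dict.mk ((d.items).map (pvF th));
     let users :=
       if !(users.contains u) then users.insert u (1, false)
       else users.modify u (0, false) (fun v => (v.1 + 1, v.2));
     if t > th then users.modify u (0, false) (fun v => (v.1, true)) else users)
      = PySem.Dict.mk (((d.modify u [] (fun l => l ++ [t])).items).map (pvF th)) := by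
  have hmod : d.modify u [] (fun l => l ++ [t]) = d.insert u (d.getD u [] ++ [t]) := rfl
  rw [hmod, ← pv_insert_map]
  have hval : ∀ (v : Int × Bool),
      (if t > th then
        ((PySem.Dict.mk ((d.items).map (pvF th))).insert u v).modify u (0, false) (fun w => (w.1, true))
       else (PySem.Dict.mk ((d.items).map (pvF th))).insert u v)
      = (PySem.Dict.mk ((d.items).map (pvF th))).insert u
          (if t > th then (v.1, true) else v) := by
    intro v
    by_cases ht : t > th
    · simp [ht, PySem.Dict.modify, PySem.Dict.getD_insert_self, PySem.Dict.insert_insert_self]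
    · simp [ht]
  by_cases hc : d.contains u = true
  · obtain ⟨l, hl⟩ : ∃ l, d.get? u = some l := by
      have := PySem.Dict.contains_eq_isSome_get? d u
      rw [hc] at this
      cases hget : d.get? u
      · rw [hget] at this; simp at this
      · exact ⟨_, rfl⟩
    have hcm : (PySem.Dict.mk ((d.items).map (pvF th))).contains u = true := by
      rw [pv_contains_map]; exact hc
    have hgd : (PySem.Dict.mk ((d.items).map (pvF th))).getD u (0, false)
        = ((l.length : Int), l.any (fun x => decide (x > th))) := by
      rw [PySem.Dict.getD_eq_get?_getD, pv_get?_map, hl]; rfl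
    have hgdB : d.getD u [] = l := by rw [PySem.Dict.getD_eq_get?_getD, hl]; rfl
    show (if t > th then _ else _) = _
    rw [show (if !((PySem.Dict.mk ((d.items).map (pvF th))).contains u) then (PySem.Dict.mk ((d.items).map (pvF th))).insert u ((1:Int), false)
       else (PySem.Dict.mk ((d.items).map (pvF th))).modify u (0, false) (fun v => (v.1 + 1, v.2)))
       = (PySem.Dict.mk ((d.items).map (pvF th))).insert u ((l.length + 1 : Int), l.any (fun x => decide (x > th))) from by
         simp [hcm, PySem.Dict.modify, hgd]]
    rw [hval]
    congr 1
    simp only [pvF, hgdB, List.any_append, List.length_append, List.any_cons, List.any_nil]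
    by_cases ht : t > th <;> simp [ht]
  · have hc' : d.contains u = false := eq_false_of_ne_true hc
    have hcm : (PySem.Dict.mk ((d.items).map (pvF th))).contains u = false := by
      rw [pv_contains_map]; exact hc'
    have hnone : d.get? u = none := by
      have := PySem.Dict.contains_eq_isSome_get? d u
      rw [hc'] at this
      cases hg : d.get? u
      · rfl
      · rw [hg] at this; simp at this
    have hgdB : d.getD u [] = [] := by rw [PySem.Dict.getD_eq_get?_getD, hnone]; rfl
    show (if t > th then _ else _) = _
    rw [show (if !((PySem.Dict.mk ((d.items).map (pvF th))).contains u) then (PySem.Dict.mk ((d.items).map (pvF th))).insert u ((1:Int), false)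
       else (PySem.Dict.mk ((d.items).map (pvF th))).modify u (0, false) (fun v => (v.1 + 1, v.2)))
       = (PySem.Dict.mk ((d.items).map (pvF th))).insert u ((1:Int), false) from by
         simp [hcm]]
    rw [hval]
    congr 1
    simp only [pvF, hgdB, List.nil_append, List.length_cons, List.length_nil, List.any_cons, List.any_nil]
    by_cases ht : t > th <;> simp [ht]

-- The loop invariant: A's fold stays related by pvF to the ghost grouping fold, entrywise.
theorem pv_fold (th : Int) (l : List (String × Int)) (d : PySem.Dict String (List Int)) :
    l.foldl (fun users session =>
      let users :=
        if !(users.contains session.1) then users.insert session.1 (1, false)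
        else users.modify session.1 (0, false) (fun v => (v.1 + 1, v.2))
      if session.2 > th then users.modify session.1 (0, false) (fun v => (v.1, true))
      else users) (PySem.Dict.mk ((d.items).map (pvF th)))
    = PySem.Dict.mk
        (((l.foldl (fun d p => d.modify p.1 [] (fun l => l ++ [p.2])) d).items).map (pvF th)) := by
  induction l generalizing d with
  | nil => rfl
  | cons p rest ih =>
    simp only [List.foldl_cons]
    rw [pv_step th d p.1 p.2]
    exact ih _

-- The ghost grouping fold's items: the dedup'd users, each with its duration list.
theorem pv_items (l : List (String × Int)) :
    (l.foldl (fun d p => d.modify p.1 [] (fun l => l ++ [p.2]))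
        (PySem.Dict.empty : PySem.Dict String (List Int))).items
      = (PySem.List.dedup (l.map (·.1))).map
          (fun u => (u, (l.filter (fun p => p.1 == u)).map (·.2))) := by
  set G := l.foldl (fun d p => d.modify p.1 [] (fun l => l ++ [p.2]))
      (PySem.Dict.empty : PySem.Dict String (List Int)) with hG
  have hnd : G.keys.Nodup := by
    rw [hG]
    exact PySem.Dict.nodup_keys_foldl_modify_key l (·.1) [] (fun _ p => (fun l => l ++ [p.2])) _
      PySem.Dict.nodup_keys_empty
  have hkeys : G.keys = PySem.List.dedup (l.map (·.1)) := by
    rw [hG, PySem.Dict.keys_foldl_modify_key]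
    simp [PySem.Dict.keys_empty, PySem.Set.update, PySem.Set.ofList_eq_foldl]
  have hget : ∀ u, G.getD u [] = (l.filter (fun p => p.1 == u)).map (·.2) := by
    intro u
    rw [hG, PySem.Dict.getD_foldl_modify_append]
    simp [PySem.Dict.getD_empty]
  rw [PySem.Dict.items_eq_map_keys G hnd [], hkeys]
  apply List.map_congr_left
  intro u _
  rw [hget]

-- ===== VERDICT (by name: the statement is the Claim_ definition above) =====
theorem find_suspicious_users_spec : Claim_equal_find_suspicious_users := by
  intro sessions threshold _
  unfold Spec_find_suspicious_users find_suspicious_users find_suspicious_users_alt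
  have hempty : (PySem.Dict.empty : PySem.Dict String (Int × Bool))
      = PySem.Dict.mk (((PySem.Dict.empty : PySem.Dict String (List Int)).items).map (pvF threshold)) := rfl
  rw [hempty, pv_fold, pv_items]
  simp only [List.map_map, List.filter_map]
  have hpred : ∀ u : String,
      ((fun kv : String × (Int × Bool) => decide (kv.2.1 > 1) && kv.2.2) ∘
        (pvF threshold ∘ fun u => (u, (sessions.filter (fun p => p.1 == u)).map (·.2)))) u
      = (fun u => decide ((sessions.countP (fun p => p.1 == u) : Int) > 1) &&
          sessions.any (fun p => p.1 == u && decide (p.2 > threshold))) u := by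
    intro u
    simp only [Function.comp, pvF, List.length_map, List.any_map, List.any_filter,
      List.countP_eq_length_filter]
  rw [List.filter_congr (fun u _ => hpred u)]
  have hfst : ((·.1) ∘ (pvF threshold ∘ fun u => (u, (sessions.filter (fun p => p.1 == u)).map (·.2))))
      = fun u : String => u := rfl
  simp [hfst]
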